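-- pv_equiv track=rewrite | github.com/teomaik/Code_Beauty_Calculator | code aesthetics/utils.py | group_leading_space_differences
-- ===== SOURCE A (Python) =====
-- def group_leading_space_differences(binary_table):
--     """
--     Analyze the differences in the number of leading spaces between consecutive lines.
--
--     Args:
--     - binary_table (list of list of int): The binary table to analyze.
--
--     Returns:
--     - difference_counts (dict): A dictionary where keys are the differences in leading spaces,
--                                 and values are the counts of those differences.
--     - distinct_differences (int): The number of distinct leading space differences.
--     """
--     difference_counts = {}
--     previous_leading_spaces = None
--
--     for row in binary_table:
--         # Check if the row is empty (all zeros)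
--         if all(cell == 0 for cell in row):
--             continue  # Skip completely empty lines
--
--         # Count leading spaces in the current row
--         leading_spaces = 0
--         for cell in row:
--             if cell == 0:
--                 leading_spaces += 1
--             else:
--                 break
--
--         if previous_leading_spaces is not None:
--             # Calculate the absolute difference in leading spaces
--             difference = abs(leading_spaces - previous_leading_spaces)
--             if difference > 0:  # Ignore zero differences
--                 difference_counts[difference] = difference_counts.get(difference, 0) + 1
--
--         # Update the previous leading spaces
--         previous_leading_spaces = leading_spaces
--
--     # Calculate the number of distinct differences
--     distinct_differences = len(difference_counts)
--
--     return difference_counts, distinct_differences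
-- ===== SOURCE B (Python) =====
-- def group_leading_space_differences(binary_table):
--     # Stage 1: leading-zero counts of the non-all-zero rows.
--     spaces = [next(i for i, c in enumerate(row) if c != 0)
--               for row in binary_table if any(c != 0 for c in row)]
--     # Stage 2: positive absolute differences between consecutive counts.
--     diffs = [abs(b - a) for a, b in zip(spaces, spaces[1:]) if b != a]
--     # Stage 3: no incremental tally dict at all — take the distinct differences
--     # in first-occurrence order and count each with one scan of the diff list.
--     keys = list(dict.fromkeys(diffs))
--     difference_counts = {d: diffs.count(d) for d in keys}
--     return difference_counts, len(difference_counts)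
-- ===== Notes on version B (the rewrite author's own statement) =====
-- stated objective: alternative
-- what changed: Replaces A's single streaming pass with an incremental get-and-increment dict by three staged passes with a different counting mechanism: extract leading-zero counts, materialise the positive pairwise differences, then build the result from the distinct differences (dict.fromkeys) with one list.count scan per distinct key instead of any incremental tally.
import Mathlib
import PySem

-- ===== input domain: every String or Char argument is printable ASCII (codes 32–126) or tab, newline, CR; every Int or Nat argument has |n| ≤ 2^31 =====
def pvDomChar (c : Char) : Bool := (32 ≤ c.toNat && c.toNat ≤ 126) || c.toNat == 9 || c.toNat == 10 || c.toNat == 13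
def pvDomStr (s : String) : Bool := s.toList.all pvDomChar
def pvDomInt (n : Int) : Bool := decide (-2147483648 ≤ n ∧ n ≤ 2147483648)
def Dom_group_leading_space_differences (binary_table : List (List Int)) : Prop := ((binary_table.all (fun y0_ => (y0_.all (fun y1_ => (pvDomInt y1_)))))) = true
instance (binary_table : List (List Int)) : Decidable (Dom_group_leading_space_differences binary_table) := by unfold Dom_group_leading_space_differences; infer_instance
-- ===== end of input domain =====

-- B replaces A's streaming pass with an incremental tally dict by three staged passes:
-- leading-zero counts, the positive pairwise differences, then distinct keys counted by scans.

-- ===== PORT A =====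
-- 'for cell in row: if cell == 0: leading_spaces += 1 else: break'
def pvLeadA : List Int → Int
  | [] => 0
  | c :: t => if c = 0 then 1 + pvLeadA t else 0

-- A's main loop: state (difference_counts, previous_leading_spaces)
def pvLoopA : List (List Int) → PySem.Dict Int Int → Option Int → PySem.Dict Int Int × Option Int
  | [], d, prev => (d, prev)
  | row :: rest, d, prev =>
    if row.all (fun cell => cell == 0) then pvLoopA rest d prev
    else
      let leading_spaces := pvLeadA row
      let d' := match prev with
        | some p =>
          let difference := |leading_spaces - p|
          if difference > 0 then d.insert difference (d.getD difference 0 + 1) else d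
        | none => d
      pvLoopA rest d' (some leading_spaces)

def group_leading_space_differences (binary_table : List (List Int)) : (List (Int × Int)) × Int :=
  let r := pvLoopA binary_table PySem.Dict.empty none
  (r.1.items, (r.1.items.length : Int))

-- ===== PORT B =====
-- 'next(i for i, c in enumerate(row) if c != 0)' on the rows with any nonzero cell
def pvSpacesB (binary_table : List (List Int)) : List Int :=
  (binary_table.filter (fun row => row.any (fun cell => cell != 0))).map
    (fun row => ((row.findIdx (fun cell => cell != 0) : Nat) : Int))

-- '[abs(b - a) for a, b in zip(spaces, spaces[1:]) if b != a]'
def pvDiffsB (spaces : List Int) : List Int :=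
  ((spaces.zip spaces.tail).filter (fun p => p.2 != p.1)).map (fun p => |p.2 - p.1|)

def group_leading_space_differences_alt (binary_table : List (List Int)) : (List (Int × Int)) × Int :=
  let diffs := pvDiffsB (pvSpacesB binary_table)
  let keys := PySem.List.dedup diffs
  let difference_counts :=
    keys.foldl (fun d k => d.insert k ((diffs.count k : Nat) : Int)) PySem.Dict.empty
  (difference_counts.items, (difference_counts.items.length : Int))

-- ===== PRECONDITION & SPEC =====
def Spec_group_leading_space_differences (binary_table : List (List Int)) (out : (List (Int × Int)) × Int) : Prop := out = group_leading_space_differences_alt binary_table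
instance (binary_table : List (List Int)) (out : (List (Int × Int)) × Int) : Decidable (Spec_group_leading_space_differences binary_table out) := by unfold Spec_group_leading_space_differences; infer_instance

-- ===== CLAIM =====
def Claim_equal_group_leading_space_differences : Prop := ∀ (binary_table : List (List Int)), Dom_group_leading_space_differences binary_table → Spec_group_leading_space_differences binary_table (group_leading_space_differences binary_table)

-- ===== LEMMAS AND PROOFS =====

theorem pvLead_eq_findIdx (row : List Int) :
    pvLeadA row = ((row.findIdx (fun cell => cell != 0) : Nat) : Int) := by
  induction row with
  | nil => simp [pvLeadA]
  | cons c t ih =>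
    by_cases hc : c = 0
    · simp [pvLeadA, hc, List.findIdx_cons, ih]; ring
    · have hb : (c != 0) = true := by simpa using hc
      simp [pvLeadA, hc, List.findIdx_cons, hb]

theorem pvDiffsB_cons_cons (a b : Int) (s : List Int) :
    pvDiffsB (a :: b :: s) = (if b ≠ a then [|b - a|] else []) ++ pvDiffsB (b :: s) := by
  by_cases h : b = a <;> simp [pvDiffsB, h]

-- A's loop tallies exactly the positive pairwise differences of (prev.toList ++ spaces)
theorem pvLoopA_eq_tally (rows : List (List Int)) (d : PySem.Dict Int Int) (prev : Option Int) :
    (pvLoopA rows d prev).1 =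
      (pvDiffsB (prev.toList ++ pvSpacesB rows)).foldl
        (fun d x => d.insert x (d.getD x 0 + 1)) d := by
  induction rows generalizing d prev with
  | nil => cases prev <;> simp [pvLoopA, pvSpacesB, pvDiffsB]
  | cons row rest ih =>
    by_cases hall : row.all (fun cell => cell == 0)
    · have hany : row.any (fun cell => cell != 0) = false := by
        simp only [List.any_eq_false]
        intro x hx
        simpa using List.all_eq_true.mp hall x hx
      simp [pvLoopA, hall, pvSpacesB, hany, ih]
    · have hany : row.any (fun cell => cell != 0) = true := by
        by_contra hne
        exact hall (by
          rw [List.all_eq_true]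
          intro x hx
          simpa using List.any_eq_false.mp (Bool.eq_false_iff.mpr hne) x hx)
      have hsp : pvSpacesB (row :: rest)
          = ((row.findIdx (fun cell => cell != 0) : Nat) : Int) :: pvSpacesB rest := by
        simp [pvSpacesB, hany]
      cases prev with
      | none =>
        simp only [pvLoopA, hall, Bool.false_eq_true, if_false]
        rw [ih, hsp, pvLead_eq_findIdx]
        rfl
      | some p =>
        simp only [pvLoopA, hall, Bool.false_eq_true, if_false]
        rw [ih, hsp, pvLead_eq_findIdx]
        simp only [Option.toList, List.cons_append, List.nil_append,
          pvDiffsB_cons_cons ]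
        set k := ((row.findIdx (fun cell => cell != 0) : Nat) : Int) with hk
        by_cases hkp : k = p
        · simp [hkp]
        · have hpos : (0 : Int) < |k - p| := by
            rw [abs_pos]; omega
          have hne : p ≠ k := fun h => hkp h.symm
          simp [hkp, hpos]

-- ===== VERDICT =====
theorem group_leading_space_differences_spec : Claim_equal_group_leading_space_differences := by
  intro binary_table _
  unfold Spec_group_leading_space_differences group_leading_space_differences
    group_leading_space_differences_alt
  dsimp only
  rw [pvLoopA_eq_tally]
  simp only [Option.toList, List.nil_append]
  rw [PySem.Dict.foldl_insert_getD_add_one_eq_counter]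
  have hB : ((PySem.List.dedup (pvDiffsB (pvSpacesB binary_table))).foldl
      (fun d k => d.insert k (((pvDiffsB (pvSpacesB binary_table)).count k : Nat) : Int))
      PySem.Dict.empty).items
      = (PySem.Set.ofList (pvDiffsB (pvSpacesB binary_table))).map
          (fun k => (k, ((pvDiffsB (pvSpacesB binary_table)).count k : Int))) := by
    rw [PySem.Dict.items_foldl_insert_fresh]
    · simp [PySem.List.dedup_eq_ofList, PySem.Dict.empty]
    · intro a _; simp [PySem.Dict.contains_empty]
    · simp [PySem.List.dedup_eq_ofList, PySem.Set.nodup_ofList]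
  rw [hB, PySem.Dict.items_counter]
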